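-- pv_equiv track=rewrite | github.com/dritlopes/OB1-reader-model | src/reading_functions.py | define_slot_matching_order
-- ===== SOURCE A (Python) =====
-- def define_slot_matching_order(n_words_in_stim, fixated_position_stimulus):
--
--     # Slot-matching mechanism
--     # MM: check len stim, then determine order in which words are matched to slots in stim
--     # Words are checked in the order of its attentwght. The closer to the fixation point, the more attention weight.
--     # AL: made computation more efficient and dependent on position of fixated word (so we are not assuming anymore that fixation is always at the center of the stimulus)
--     positions = [+1,-1,+2,-2,+3,-3]
--     order_match_check = [fixated_position_stimulus]
--     for p in positions:
--         next_pos = fixated_position_stimulus + p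
--         if next_pos >= 0 and next_pos < n_words_in_stim:
--             order_match_check.append(next_pos)
--
--     return order_match_check
-- ===== SOURCE B (Python) =====
-- def define_slot_matching_order(n_words_in_stim, fixated_position_stimulus):
--     f = fixated_position_stimulus
--     neighbours = [f + d for d in range(-3, 4)
--                   if d != 0 and 0 <= f + d < n_words_in_stim]
--     # closest first; at equal distance the word to the right comes first
--     neighbours.sort(key=lambda p: 2 * abs(p - f) + (p < f))
--     return [f] + neighbours
-- ===== Notes on version B (the rewrite author's own statement) =====
-- stated objective: idiomatic
-- what changed: Replaces A's hand-listed offset sequence [+1,-1,+2,-2,+3,-3] with an append loop by a range(-3,4) comprehension of valid neighbour indices sorted by the key 2*abs(p-f)+(p<f) (distance first, right side before left on ties).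
import Mathlib
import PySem

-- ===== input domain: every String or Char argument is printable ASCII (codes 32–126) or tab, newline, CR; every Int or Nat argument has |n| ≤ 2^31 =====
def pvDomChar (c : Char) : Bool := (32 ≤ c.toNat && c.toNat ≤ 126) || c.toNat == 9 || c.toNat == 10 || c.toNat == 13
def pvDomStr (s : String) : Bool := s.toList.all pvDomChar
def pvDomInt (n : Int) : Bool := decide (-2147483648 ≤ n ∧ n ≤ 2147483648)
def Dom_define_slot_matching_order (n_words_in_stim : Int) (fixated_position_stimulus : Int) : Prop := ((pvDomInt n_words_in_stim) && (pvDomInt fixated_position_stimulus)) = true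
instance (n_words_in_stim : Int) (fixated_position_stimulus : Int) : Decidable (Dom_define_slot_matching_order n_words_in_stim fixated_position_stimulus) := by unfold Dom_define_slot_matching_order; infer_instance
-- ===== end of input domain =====

-- B replaces A's hand-listed offset sequence [+1,-1,+2,-2,+3,-3] by a comprehension over
-- range(-3,4) sorted by distance from fixation (ties: right side first) — objective: idiomatic.

-- ===== PORT A =====
def define_slot_matching_order (n_words_in_stim : Int) (fixated_position_stimulus : Int) : List Int :=
  let positions : List Int := [1, -1, 2, -2, 3, -3]
  positions.foldl (fun order_match_check p =>
    let next_pos := fixated_position_stimulus + p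
    if next_pos ≥ 0 ∧ next_pos < n_words_in_stim then order_match_check ++ [next_pos]
    else order_match_check) [fixated_position_stimulus]

-- ===== PORT B =====
def define_slot_matching_order_alt (n_words_in_stim : Int) (fixated_position_stimulus : Int) : List Int :=
  let f := fixated_position_stimulus
  let neighbours : List Int :=
    ((PySem.List.pyRange (-3) 4 1).filter
      (fun d => decide (d ≠ 0 ∧ 0 ≤ f + d ∧ f + d < n_words_in_stim))).map (fun d => f + d)
  let sortedNeighbours :=
    PySem.List.sorted neighbours (fun p => 2 * |p - f| + (if p < f then 1 else 0)) false
  [f] ++ sortedNeighbours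

-- ===== PRECONDITION & SPEC =====
def Spec_define_slot_matching_order (n_words_in_stim : Int) (fixated_position_stimulus : Int) (out : List Int) : Prop := out = define_slot_matching_order_alt n_words_in_stim fixated_position_stimulus
instance (n_words_in_stim : Int) (fixated_position_stimulus : Int) (out : List Int) : Decidable (Spec_define_slot_matching_order n_words_in_stim fixated_position_stimulus out) := by unfold Spec_define_slot_matching_order; infer_instance

-- ===== CLAIM (what is proved, stated in full; the proofs are below) =====
def Claim_equal_define_slot_matching_order : Prop := ∀ (n_words_in_stim : Int) (fixated_position_stimulus : Int), Dom_define_slot_matching_order n_words_in_stim fixated_position_stimulus → Spec_define_slot_matching_order n_words_in_stim fixated_position_stimulus (define_slot_matching_order n_words_in_stim fixated_position_stimulus)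

-- ===== LEMMAS AND PROOFS =====

-- A's loop, characterised: it is [f] followed by the valid positions, in offset order.
theorem foldA_eq_filter_map (n f : Int) (l : List Int) (acc : List Int) :
    l.foldl (fun acc p =>
      let next_pos := f + p
      if next_pos ≥ 0 ∧ next_pos < n then acc ++ [next_pos] else acc) acc
    = acc ++ (l.filter (fun p => decide (f + p ≥ 0 ∧ f + p < n))).map (fun p => f + p) := by
  induction l generalizing acc with
  | nil => simp
  | cons h t ih =>
    simp only [List.foldl_cons, List.filter_cons, ih]
    by_cases hc : f + h ≥ 0 ∧ f + h < n <;> simp [hc]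

theorem define_slot_matching_order_spec_aux (n f : Int) :
    define_slot_matching_order n f = define_slot_matching_order_alt n f := by
  unfold define_slot_matching_order define_slot_matching_order_alt
  rw [foldA_eq_filter_map]
  refine congrArg (List.cons f) ?_
  -- name the sorted order: A's neighbour list is a strictly key-increasing rearrangement of B's
  refine (PySem.List.sorted_eq_of_perm_of_pairwise_lt _ _ _ ?_ ?_).symm
  · -- permutation
    refine List.Perm.map _ ?_
    have hsplit : (PySem.List.pyRange (-3) 4 1).filter
        (fun d => decide (d ≠ 0 ∧ 0 ≤ f + d ∧ f + d < n))
        = ([-3, -2, -1, 1, 2, 3] : List Int).filter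
            (fun p => decide (f + p ≥ 0 ∧ f + p < n)) := by
      have h0 : ([-3, -2, -1, 1, 2, 3] : List Int)
          = (PySem.List.pyRange (-3) 4 1).filter (fun d => decide (d ≠ 0)) := by decide
      rw [h0, List.filter_filter]
      refine List.filter_congr ?_
      intro d _
      by_cases h1 : d = 0 <;> by_cases h2 : 0 ≤ f + d ∧ f + d < n <;> simp [h1, h2]
    rw [hsplit]
    exact List.Perm.filter _ (by decide)
  · -- strictly increasing keys along A's order
    simp only [List.append_eq, List.nil_append, List.pairwise_map]
    refine List.Pairwise.sublist List.filter_sublist ?_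
    have key_eq : ∀ d : Int,
        2 * |f + d - f| + (if f + d < f then 1 else 0) = 2 * |d| + (if d < 0 then 1 else 0) := by
      intro d
      have h1 : f + d - f = d := by ring
      have h2 : (f + d < f) = (d < 0) := by
        apply propext; omega
      rw [h1]; simp only [h2]
    simp only [key_eq]
    decide

-- ===== VERDICT (by name: the statement is the Claim_ definition above) =====
theorem define_slot_matching_order_spec : Claim_equal_define_slot_matching_order := by
  intro n f _
  exact define_slot_matching_order_spec_aux n f
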